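-- pv_equiv track=rewrite | github.com/pypi-data/pypi-mirror-302 | packages/panversion/panversion-0.0.1.tar.gz/panversion-0.0.1/panversion/__init__.py | compare_semantic_prereleases
-- ===== SOURCE A (Python) =====
-- def compare_semantic_prereleases(prereleases):
--     # https://semver.org/#spec-item-11
--     for prerelease in prereleases:
--         try:
--             self_prerelease = int(prerelease[0])
--         except (ValueError, TypeError):
--             self_prerelease = prerelease[0]
--         try:
--             other_prerelease = int(prerelease[1])
--         except (ValueError, TypeError):
--             other_prerelease = prerelease[1]
--         # Identifiers consisting of only digits are compared numerically.
--         # Identifiers with letters or hyphens are compared lexically in ASCII sort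
--         # order.
--         if type(self_prerelease) == type(other_prerelease):
--             if self_prerelease < other_prerelease:
--                 return -1
--             elif self_prerelease > other_prerelease:
--                 return 1
--         else:
--             # Numeric identifiers always have lower precedence than non-numeric
--             # identifiers.
--             if (
--                 isinstance(self_prerelease, int) and
--                 isinstance(other_prerelease, str)
--             ):
--                 return -1
--             if (
--                 isinstance(self_prerelease, str) and
--                 isinstance(other_prerelease, int)
--             ):
--                 return 1
--             # A larger set of pre-release fields has a higher precedence than a
--             # smaller set, if all of the preceding identifiers are equal.
--             if self_prerelease is None:
--                 return -1
--             if self_prerelease is not None: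
--                 return 1
--     return 0
-- ===== SOURCE B (Python) =====
-- def _key(ident):
--     # Normalize a prerelease identifier to a homogeneous (rank, number, text)
--     # sort key: None -> rank 0, numeric -> rank 1, other string -> rank 2.
--     try:
--         return (1, int(ident), '')
--     except ValueError:
--         return (2, 0, ident)
--     except TypeError:
--         return (0, 0, '')
--
--
-- def compare_semantic_prereleases(prereleases):
--     for pair in prereleases:
--         left, right = _key(pair[0]), _key(pair[1])
--         delta = (left > right) - (left < right)
--         if delta:
--             return delta
--     return 0
-- ===== Notes on version B (the rewrite author's own statement) =====
-- stated objective: simpler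
-- what changed: Replaces A's six-way type()/isinstance/None branch cascade with a normalization of each identifier to a homogeneous (rank, number, text) sort key, so each pair is decided by one plain tuple comparison (left>right)-(left<right) instead of case analysis on types.
import Mathlib
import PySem

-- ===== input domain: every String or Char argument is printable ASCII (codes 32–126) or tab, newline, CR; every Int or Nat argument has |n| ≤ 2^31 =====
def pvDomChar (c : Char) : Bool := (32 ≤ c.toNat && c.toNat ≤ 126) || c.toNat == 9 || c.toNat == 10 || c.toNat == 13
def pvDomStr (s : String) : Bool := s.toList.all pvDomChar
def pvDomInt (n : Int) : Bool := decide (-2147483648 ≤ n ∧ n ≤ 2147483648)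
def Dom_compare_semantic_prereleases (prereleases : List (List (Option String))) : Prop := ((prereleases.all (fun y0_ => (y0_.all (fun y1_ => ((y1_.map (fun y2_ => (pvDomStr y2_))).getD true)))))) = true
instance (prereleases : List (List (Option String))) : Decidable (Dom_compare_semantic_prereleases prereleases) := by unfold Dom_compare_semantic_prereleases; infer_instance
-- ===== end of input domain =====

-- B replaces A's type()/isinstance/None branch cascade by normalizing each identifier to a
-- homogeneous (rank, number, text) sort key decided by one tuple comparison; objective: simpler.

-- A Python identifier parsed by int()/try-except: None, an int, or a non-numeric string.
inductive PVal
  | vnone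
  | vint (n : Int)
  | vstr (s : String)
deriving DecidableEq, Repr

-- ===== PORT A =====
-- the try: int(...) except (ValueError, TypeError): ... parse (int(None) raises TypeError)
def aParse (o : Option String) : PVal :=
  match o with
  | none => PVal.vnone
  | some s =>
    match PySem.Int.ofStr? s with
    | some n => PVal.vint n
    | none => PVal.vstr s

-- On inputs excluded by Pre_ the Python raises (IndexError on a short pair, TypeError on a
-- reached (None, None) pair); there the port returns the arbitrary value that falls out
-- (pyGetD default / the vnone-vnone branch returning 0).
def compare_semantic_prereleases : List (List (Option String)) → Int
  | [] => 0
  | prerelease :: rest =>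
    let self_prerelease := aParse (PySem.List.pyGetD prerelease 0 none)
    let other_prerelease := aParse (PySem.List.pyGetD prerelease 1 none)
    match self_prerelease, other_prerelease with
    | PVal.vint x, PVal.vint y =>
      if x < y then -1 else if x > y then 1 else compare_semantic_prereleases rest
    | PVal.vstr x, PVal.vstr y =>
      if x < y then -1 else if x > y then 1 else compare_semantic_prereleases rest
    | PVal.vnone, PVal.vnone => 0
    | PVal.vint _, PVal.vstr _ => -1
    | PVal.vstr _, PVal.vint _ => 1
    | PVal.vnone, _ => -1
    | _, PVal.vnone => 1

-- ===== PORT B =====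
-- _key: try int(ident) -> (1, n, ''); except ValueError -> (2, 0, ident); except TypeError -> (0, 0, '')
def bKey (ident : Option String) : Nat × Int × String :=
  match ident with
  | none => (0, 0, "")                      -- int(None) raises TypeError
  | some s =>
    match PySem.Int.ofStr? s with
    | some n => (1, n, "")
    | none => (2, 0, s)                     -- int(s) raises ValueError

-- Python's lexicographic `<` on the homogeneous (int, int, str) triples
def keyLt (a b : Nat × Int × String) : Bool :=
  decide (a.1 < b.1) || (decide (a.1 = b.1) &&
    (decide (a.2.1 < b.2.1) || (decide (a.2.1 = b.2.1) && decide (a.2.2 < b.2.2))))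

def compare_semantic_prereleases_alt : List (List (Option String)) → Int
  | [] => 0
  | pair :: rest =>
    let left := bKey (PySem.List.pyGetD pair 0 none)
    let right := bKey (PySem.List.pyGetD pair 1 none)
    let delta : Int := (if keyLt right left then 1 else 0) - (if keyLt left right then 1 else 0)
    if delta ≠ 0 then delta else compare_semantic_prereleases_alt rest

-- ===== PRECONDITION & SPEC =====
-- a pair on which A's loop body continues to the next pair: equal parses, not both None
def tiePair (p : List (Option String)) : Bool :=
  decide (2 ≤ p.length) && decide (aParse (p.getD 0 none) = aParse (p.getD 1 none))
    && decide (p.getD 0 none ≠ none)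

-- a pair on which A's loop body raises: too short (IndexError) or (None, None) (TypeError)
def badPair (p : List (Option String)) : Bool :=
  decide (p.length < 2) || (decide (p.getD 0 none = none) && decide (p.getD 1 none = none))

-- Pre_ excludes exactly the inputs on which the Python A raises: those where, scanning the
-- pairs in order while they compare equal, A reaches a pair shorter than 2 (IndexError) or a
-- (None, None) pair (TypeError).
def Pre_compare_semantic_prereleases (prereleases : List (List (Option String))) : Prop :=
  ∀ i < prereleases.length,
    (∀ j < i, tiePair (prereleases.getD j []) = true) →
    badPair (prereleases.getD i []) = false
instance (prereleases : List (List (Option String))) : Decidable (Pre_compare_semantic_prereleases prereleases) := by unfold Pre_compare_semantic_prereleases; infer_instance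

def pvWitness_compare_semantic_prereleases : List (List (Option String)) :=
  [[some "1", some "1"], [some "alpha", some "2"], [none, none]]

def Spec_compare_semantic_prereleases (prereleases : List (List (Option String))) (out : Int) : Prop := out = compare_semantic_prereleases_alt prereleases
instance (prereleases : List (List (Option String))) (out : Int) : Decidable (Spec_compare_semantic_prereleases prereleases out) := by unfold Spec_compare_semantic_prereleases; infer_instance

-- ===== CLAIM (what is proved, stated in full; the proofs are below) =====
def Claim_equal_compare_semantic_prereleases : Prop := ∀ (prereleases : List (List (Option String))), Dom_compare_semantic_prereleases prereleases → Pre_compare_semantic_prereleases prereleases → Spec_compare_semantic_prereleases prereleases (compare_semantic_prereleases prereleases)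

-- ===== LEMMAS AND PROOFS =====
theorem aParse_eq_vnone {o : Option String} (h : aParse o = PVal.vnone) : o = none := by
  cases o with
  | none => rfl
  | some s => simp only [aParse] at h; split at h <;> simp_all

theorem pre_head {p : List (Option String)} {rest : List (List (Option String))}
    (h : Pre_compare_semantic_prereleases (p :: rest)) : badPair p = false := by
  have := h 0 (by simp) (fun j hj => absurd hj (Nat.not_lt_zero j))
  simpa using this

theorem pre_tail {p : List (Option String)} {rest : List (List (Option String))}
    (h : Pre_compare_semantic_prereleases (p :: rest)) (ht : tiePair p = true) :
    Pre_compare_semantic_prereleases rest := by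
  intro i hi hties
  have := h (i + 1) (by simpa using Nat.succ_lt_succ hi) (fun j hj => by
    cases j with
    | zero => simpa using ht
    | succ j => simpa using hties j (Nat.lt_of_succ_lt_succ hj))
  simpa using this

theorem compare_aux (l : List (List (Option String)))
    (hpre : Pre_compare_semantic_prereleases l) :
    compare_semantic_prereleases l = compare_semantic_prereleases_alt l := by
  induction l with
  | nil => rfl
  | cons p rest ih =>
    have hbad := pre_head hpre
    have hlen : 2 ≤ p.length := by
      by_contra h
      simp [badPair] at hbad
      omega
    match p, hlen with
    | a :: b :: t, _ =>
    have h0 : PySem.List.pyGetD (a :: b :: t) (0 : Int) none = a := by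
      simp [PySem.List.pyGetD_zero_cons]
    have h1 : PySem.List.pyGetD (a :: b :: t) (1 : Int) none = b := by
      simp [PySem.List.pyGetD]
    have hnn : ¬(a = none ∧ b = none) := by
      intro ⟨ha, hb⟩
      simp [badPair, ha, hb] at hbad
    have htie : aParse a = aParse b → tiePair (a :: b :: t) = true := by
      intro he
      have hna : a ≠ none := by
        intro ha
        have hb : b = none := by
          have hv : aParse b = PVal.vnone := by rw [← he, ha]; rfl
          exact aParse_eq_vnone hv
        exact hnn ⟨ha, hb⟩
      simp [tiePair, he, hna]
    have hih : aParse a = aParse b →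
        compare_semantic_prereleases rest = compare_semantic_prereleases_alt rest :=
      fun he => ih (pre_tail hpre (htie he))
    have hkey : ∀ o : Option String, bKey o =
        (match aParse o with
         | PVal.vnone => ((0 : Nat), (0 : Int), "")
         | PVal.vint n => (1, n, "")
         | PVal.vstr s => (2, 0, s)) := by
      intro o
      cases o with
      | none => rfl
      | some s => simp only [bKey, aParse]; cases PySem.Int.ofStr? s <;> rfl
    simp only [compare_semantic_prereleases, compare_semantic_prereleases_alt, h0, h1, hkey]
    cases ha : aParse a <;> cases hb : aParse b
    · exact absurd ⟨aParse_eq_vnone ha, aParse_eq_vnone hb⟩ hnn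
    · simp [keyLt]
    · simp [keyLt]
    · simp [keyLt]
    · -- vint / vint
      rename_i x y
      rcases lt_trichotomy x y with h | h | h
      · simp [keyLt, h, lt_asymm h, ne_of_lt h]
      · subst h
        simp [keyLt, hih (by rw [ha, hb])]
      · simp [keyLt, h, lt_asymm h, (ne_of_lt h).symm]
    · simp [keyLt]
    · simp [keyLt]
    · simp [keyLt]
    · -- vstr / vstr
      rename_i x y
      by_cases hlt : x < y
      · simp [keyLt, hlt, lt_asymm hlt]
      · by_cases hgt : y < x
        · simp [keyLt, hlt, hgt]
        · have hxy : x = y := le_antisymm (not_lt.mp hgt) (not_lt.mp hlt)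
          subst hxy
          simp [keyLt, hih (by rw [ha, hb])]

-- ===== VERDICT (by name: the statement is the Claim_ definition above) =====
theorem compare_semantic_prereleases_spec : Claim_equal_compare_semantic_prereleases := by
  intro prereleases _dom hpre
  exact compare_aux prereleases hpre
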